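-- pv_equiv track=rewrite | github.com/fesily/DontStarveLuaJIT2 | tools/steam_env.py | _tokenize_vdf
-- ===== SOURCE A (Python) =====
-- from typing import Any, Dict, List, Optional, Tuple
--
-- def _strip_comments(text: str) -> str:
--     """
--     Remove // comments while respecting quoted strings.
--     """
--     out = []
--     in_quote = False
--     i = 0
--     while i < len(text):
--         ch = text[i]
--         if ch == '"':
--             # Toggle quote if not escaped
--             backslashes = 0
--             j = i - 1
--             while j >= 0 and text[j] == '\\':
--                 backslashes += 1
--                 j -= 1
--             if backslashes % 2 == 0:
--                 in_quote = not in_quote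
--             out.append(ch)
--             i += 1
--             continue
--
--         if not in_quote and ch == '/' and i + 1 < len(text) and text[i + 1] == '/':
--             # Skip until end of line
--             while i < len(text) and text[i] not in '\r\n':
--                 i += 1
--             continue
--
--         out.append(ch)
--         i += 1
--
--     return ''.join(out)
--
-- def _tokenize_vdf(text: str) -> List[str]:
--     """
--     Tokenize VDF/ACF into ['"string"', '{', '}', ...] but returns strings without quotes.
--     """
--     text = _strip_comments(text)
--     tokens: List[str] = []
--     i = 0
--     n = len(text)
--
--     while i < n:
--         ch = text[i]
--         if ch.isspace():
--             i += 1
--             continue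
--
--         if ch in '{}':
--             tokens.append(ch)
--             i += 1
--             continue
--
--         if ch == '"':
--             i += 1
--             buf = []
--             while i < n:
--                 ch2 = text[i]
--                 if ch2 == '"':
--                     # end quote if not escaped
--                     backslashes = 0
--                     j = i - 1
--                     while j >= 0 and text[j] == '\\':
--                         backslashes += 1
--                         j -= 1
--                     if backslashes % 2 == 0:
--                         break
--                 buf.append(ch2)
--                 i += 1
--             tokens.append(''.join(buf).replace('\\"', '"').replace('\\\\', '\\'))
--             i += 1  # skip closing quote
--             continue
--
--         # bare token (unquoted)
--         j = i
--         while j < n and (not text[j].isspace()) and text[j] not in '{}"':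
--             j += 1
--         tokens.append(text[i:j])
--         i = j
--
--     return tokens
-- ===== SOURCE B (Python) =====
-- from typing import List
--
-- def _strip_comments(text: str) -> str:
--     # single forward pass: escape flag + pending-slash + comment mode
--     out = []
--     in_quote = False
--     esc = False
--     pending = False
--     in_comment = False
--     for ch in text:
--         if in_comment:
--             if ch in '\r\n':
--                 in_comment = False
--                 out.append(ch)
--             esc = False
--             continue
--         if pending:
--             pending = False
--             if ch == '/':
--                 in_comment = True
--                 continue
--             out.append('/')
--             esc = False
--         if ch == '"':
--             if not esc:
--                 in_quote = not in_quote
--             out.append(ch)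
--             esc = False
--         elif ch == '/' and not in_quote:
--             pending = True
--             esc = False
--         else:
--             out.append(ch)
--             esc = (ch == '\\') and not esc
--     if pending:
--         out.append('/')
--     return ''.join(out)
--
-- def _unescape(s: str) -> str:
--     return s.replace('\\"', '"').replace('\\\\', '\\')
--
-- def _tokenize_vdf(text: str) -> List[str]:
--     text = _strip_comments(text)
--     tokens: List[str] = []
--     sbuf = None   # list of chars while inside a quoted string, else None
--     esc = False
--     bbuf = None   # list of chars of current bare token, else None
--     for ch in text:
--         if sbuf is not None:
--             if ch == '"' and not esc:
--                 tokens.append(_unescape(''.join(sbuf)))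
--                 sbuf = None
--             else:
--                 sbuf.append(ch)
--                 esc = (ch == '\\') and not esc
--         elif bbuf is not None:
--             if ch.isspace() or ch in '{}"':
--                 tokens.append(''.join(bbuf))
--                 bbuf = None
--                 if ch in '{}':
--                     tokens.append(ch)
--                 elif ch == '"':
--                     sbuf = []
--                     esc = False
--             else:
--                 bbuf.append(ch)
--         else:
--             if ch.isspace():
--                 pass
--             elif ch in '{}':
--                 tokens.append(ch)
--             elif ch == '"':
--                 sbuf = []
--                 esc = False
--             else:
--                 bbuf = [ch]
--     if sbuf is not None:
--         tokens.append(_unescape(''.join(sbuf)))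
--     elif bbuf is not None:
--         tokens.append(''.join(bbuf))
--     return tokens
-- ===== Notes on version B (the rewrite author's own statement) =====
-- stated objective: faster
-- what changed: Replaces both backward backslash-counting index loops (inner `while j >= 0` scans before every quote) with forward single-pass state machines: the comment stripper tracks an escape flag plus pending-slash/comment modes, and the tokenizer is a mode automaton (top / in-string / bare-token) that never re-scans, keeping the exact unescaping and retained newlines. (timing: ~2x faster; single forward pass avoids the per-quote backward rescans and the comment re-scan)
import Mathlib
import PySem

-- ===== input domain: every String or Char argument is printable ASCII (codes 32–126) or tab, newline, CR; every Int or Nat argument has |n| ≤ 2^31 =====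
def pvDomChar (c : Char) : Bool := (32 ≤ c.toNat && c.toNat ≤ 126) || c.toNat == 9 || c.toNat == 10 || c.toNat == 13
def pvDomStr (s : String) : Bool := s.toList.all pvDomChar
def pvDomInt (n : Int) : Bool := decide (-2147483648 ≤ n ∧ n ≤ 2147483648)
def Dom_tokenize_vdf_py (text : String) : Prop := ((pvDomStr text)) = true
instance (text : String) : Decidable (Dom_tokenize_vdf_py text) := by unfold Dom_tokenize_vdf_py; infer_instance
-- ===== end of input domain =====

-- A = two index loops with backward backslash counting; B = forward single-pass state machines
-- (escape flag + pending-slash/comment mode for the stripper, a mode automaton for the tokenizer).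


-- shared by both ports: ''.join(buf).replace('\\"', '"').replace('\\\\', '\\')
def unescapeTok (cs : List Char) : String :=
  String.ofList (PySem.Chars.replace (PySem.Chars.replace cs ['\\', '"'] ['"']) ['\\', '\\'] ['\\'])

-- ===== PORT A =====
-- inner `while j >= 0 and text[j] == '\\'` loop, walking the reversed prefix
def bsRunA : List Char → Nat
  | [] => 0
  | c :: rs => if c == '\\' then bsRunA rs + 1 else 0

-- inner `while i < len(text) and text[i] not in '\r\n'` loop (zipper: reversed prefix, rest)
def skipLineA : List Char → List Char → List Char × List Char
  | pre, [] => (pre, [])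
  | pre, c :: rs => if c == '\r' || c == '\n' then (pre, c :: rs) else skipLineA (c :: pre) rs

lemma skipLineA_len (pre l : List Char) : (skipLineA pre l).2.length ≤ l.length := by
  induction l generalizing pre with
  | nil => simp [skipLineA]
  | cons c rs ih =>
    simp only [skipLineA]
    split
    · simp
    · exact le_trans (ih (c :: pre)) (Nat.le_succ _)

-- _strip_comments main while loop, as a zipper over (reversed prefix, rest)
def stripA : List Char → List Char → Bool → List Char → List Char
  | _, [], _, out => out.reverse
  | pre, c :: rs, inq, out =>
    if c == '"' then
      stripA (c :: pre) rs (if bsRunA pre % 2 == 0 then !inq else inq) (c :: out)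
    else if h : (!inq && c == '/' && rs.head? == some '/') = true then
      stripA (skipLineA pre (c :: rs)).1 (skipLineA pre (c :: rs)).2 inq out
    else stripA (c :: pre) rs inq (c :: out)
termination_by _ rest => rest.length
decreasing_by
  · simp
  · have hc : c = '/' := by
      simp only [Bool.and_eq_true, beq_iff_eq] at h; exact h.1.2
    have : skipLineA pre (c :: rs) = skipLineA (c :: pre) rs := by
      simp [skipLineA, hc]
    rw [this]
    exact Nat.lt_succ_of_le (skipLineA_len (c :: pre) rs)
  · simp

-- inner quoted-string scan: pre, rest, buf (reversed); returns (pre, rest at closing quote, buf forward)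
def scanStrA : List Char → List Char → List Char → List Char × List Char × List Char
  | pre, [], buf => (pre, [], buf.reverse)
  | pre, c :: rs, buf =>
    if c == '"' && bsRunA pre % 2 == 0 then (pre, c :: rs, buf.reverse)
    else scanStrA (c :: pre) rs (c :: buf)

lemma scanStrA_len (pre l buf : List Char) : (scanStrA pre l buf).2.1.length ≤ l.length := by
  induction l generalizing pre buf with
  | nil => simp [scanStrA]
  | cons c rs ih =>
    simp only [scanStrA]
    split
    · simp
    · exact le_trans (ih (c :: pre) (c :: buf)) (Nat.le_succ _)

-- inner bare-token scan (first guard already known false at the call site, so the head is consumed)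
def bareScanA : List Char → List Char → List Char × List Char
  | buf, [] => (buf.reverse, [])
  | buf, c :: rs =>
    if PySem.Chars.isspace c || c == '{' || c == '}' || c == '"' then (buf.reverse, c :: rs)
    else bareScanA (c :: buf) rs

lemma bareScanA_len (buf l : List Char) : (bareScanA buf l).2.length ≤ l.length := by
  induction l generalizing buf with
  | nil => simp [bareScanA]
  | cons c rs ih =>
    simp only [bareScanA]
    split
    · simp
    · exact le_trans (ih (c :: buf)) (Nat.le_succ _)

-- _tokenize_vdf main while loop
def tokGoA : List Char → List Char → List String → List String
  | _, [], acc => acc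
  | pre, c :: rs, acc =>
    if PySem.Chars.isspace c then tokGoA (c :: pre) rs acc
    else if c == '{' || c == '}' then tokGoA (c :: pre) rs (acc ++ [String.ofList [c]])
    else if c == '"' then
      tokGoA
        (match (scanStrA (c :: pre) rs []).2.1 with
         | [] => (scanStrA (c :: pre) rs []).1
         | d :: _ => d :: (scanStrA (c :: pre) rs []).1)
        (scanStrA (c :: pre) rs []).2.1.tail
        (acc ++ [unescapeTok (scanStrA (c :: pre) rs []).2.2])
    else
      tokGoA ((bareScanA [c] rs).1.reverse ++ pre) (bareScanA [c] rs).2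
        (acc ++ [String.ofList (bareScanA [c] rs).1])
termination_by _ rest => rest.length
decreasing_by
  · simp
  · simp
  · exact Nat.lt_succ_of_le (le_trans (by simp [List.length_tail]) (scanStrA_len (c :: pre) rs []))
  · exact Nat.lt_succ_of_le (bareScanA_len [c] rs)

def tokenize_vdf_py (text : String) : List String :=
  tokGoA [] (stripA [] text.toList false []) []

-- ===== PORT B =====
-- forward single pass: state = (in_quote, esc, pending '/', in_comment), reversed output accumulator
def stripBgo : List Char → Bool → Bool → Bool → Bool → List Char → List Char
  | [], _, _, pend, _, out => (if pend then '/' :: out else out).reverse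
  | c :: rs, inq, esc, pend, incom, out =>
    if incom then
      if c == '\r' || c == '\n' then stripBgo rs inq false false false (c :: out)
      else stripBgo rs inq false false true out
    else if pend && c == '/' then stripBgo rs inq false false true out
    else
      let out1 := if pend then '/' :: out else out
      let esc1 := if pend then false else esc
      if c == '"' then stripBgo rs (if esc1 then inq else !inq) false false false (c :: out1)
      else if !inq && c == '/' then stripBgo rs inq false true false out1
      else stripBgo rs inq (c == '\\' && !esc1) false false (c :: out1)

inductive TokMode where
  | top : TokMode
  | str : List Char → Bool → TokMode
  | bare : List Char → TokMode

-- tokenizer as a mode automaton over the stripped text (buffers kept reversed)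
def tokBgo : List Char → TokMode → List String → List String
  | [], m, acc =>
    match m with
    | .top => acc
    | .str buf _ => acc ++ [unescapeTok buf.reverse]
    | .bare buf => acc ++ [String.ofList buf.reverse]
  | c :: rs, m, acc =>
    match m with
    | .str buf esc =>
      if c == '"' && !esc then tokBgo rs .top (acc ++ [unescapeTok buf.reverse])
      else tokBgo rs (.str (c :: buf) (c == '\\' && !esc)) acc
    | .bare buf =>
      if PySem.Chars.isspace c || c == '{' || c == '}' || c == '"' then
        let acc1 := acc ++ [String.ofList buf.reverse]
        if c == '{' || c == '}' then tokBgo rs .top (acc1 ++ [String.ofList [c]])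
        else if c == '"' then tokBgo rs (.str [] false) acc1
        else tokBgo rs .top acc1
      else tokBgo rs (.bare (c :: buf)) acc
    | .top =>
      if PySem.Chars.isspace c then tokBgo rs .top acc
      else if c == '{' || c == '}' then tokBgo rs .top (acc ++ [String.ofList [c]])
      else if c == '"' then tokBgo rs (.str [] false) acc
      else tokBgo rs (.bare [c]) acc

def tokenize_vdf_py_alt (text : String) : List String :=
  tokBgo (stripBgo text.toList false false false false []) .top []

-- ===== PRECONDITION & SPEC =====
def Spec_tokenize_vdf_py (text : String) (out : List String) : Prop := out = tokenize_vdf_py_alt text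
instance (text : String) (out : List String) : Decidable (Spec_tokenize_vdf_py text out) := by unfold Spec_tokenize_vdf_py; infer_instance

-- ===== CLAIM (what is proved, stated in full; the proofs are below) =====
def Claim_equal_tokenize_vdf_py : Prop := ∀ (text : String), Dom_tokenize_vdf_py text → Spec_tokenize_vdf_py text (tokenize_vdf_py text)

-- ===== LEMMAS AND PROOFS =====

-- B's escape flag as a function of A's reversed prefix
def escOf (pre : List Char) : Bool := bsRunA pre % 2 == 1

lemma escOf_cons (c : Char) (pre : List Char) :
    escOf (c :: pre) = (c == '\\' && !escOf pre) := by
  by_cases h : c = '\\' <;> simp [escOf, bsRunA, h, Nat.add_mod, Nat.mod_two_eq_zero_or_one]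
  rcases Nat.mod_two_eq_zero_or_one (bsRunA pre) with h2 | h2 <;> simp [h2]

lemma bsRunA_append_not_bs {c : Char} (xs ys : List Char) (h : c ≠ '\\') :
    bsRunA (xs ++ c :: ys) = bsRunA xs := by
  induction xs with
  | nil => simp [bsRunA, h]
  | cons x xt ih => by_cases hx : x = '\\' <;> simp [bsRunA, hx, ih]

-- a pending '/' not followed by '/' is flushed: same continuation as a normal step on '/'::out
lemma stripB_flush (rs : List Char) (inq esc : Bool) (out : List Char)
    (h : rs.head? ≠ some '/') :
    stripBgo rs inq esc true false out = stripBgo rs inq false false false ('/' :: out) := by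
  cases rs with
  | nil => simp [stripBgo]
  | cons d rs' =>
    have hd : (d == '/') = false := by
      simp only [List.head?] at h; simpa using fun hdd => h (by rw [hdd])
    simp [stripBgo, hd]

theorem strip_equiv : ∀ n (rest : List Char), rest.length ≤ n →
    (∀ pre inq esc out,
      (esc = escOf pre ∨ rest.head? = some '\r' ∨ rest.head? = some '\n') →
      stripA pre rest inq out = stripBgo rest inq esc false false out) ∧
    (∀ pre inq out,
      stripBgo rest inq false false true out =
        stripA (skipLineA pre rest).1 (skipLineA pre rest).2 inq out) := by
  intro n
  induction n with
  | zero =>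
    intro rest hlen
    have hr : rest = [] := List.length_eq_zero_iff.mp (Nat.le_zero.mp hlen)
    subst hr
    exact ⟨fun pre inq esc out _ => by simp [stripA, stripBgo],
           fun pre inq out => by simp [stripBgo, skipLineA, stripA]⟩
  | succ n ih =>
    intro rest hlen
    cases rest with
    | nil =>
      exact ⟨fun pre inq esc out _ => by simp [stripA, stripBgo],
             fun pre inq out => by simp [stripBgo, skipLineA, stripA]⟩
    | cons c rs =>
      have hrs : rs.length ≤ n := by simpa using hlen
      constructor
      · intro pre inq esc out H
        by_cases hq : c = '"'
        · subst hq
          have hesc : esc = escOf pre := by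
            rcases H with h | h | h
            · exact h
            · simp at h
            · simp at h
          have htog : (if bsRunA pre % 2 == 0 then !inq else inq)
              = (if esc then inq else !inq) := by
            subst hesc
            rcases Nat.mod_two_eq_zero_or_one (bsRunA pre) with h2 | h2 <;>
              simp [escOf, h2]
          simp only [stripA, stripBgo]
          simp only [beq_self_eq_true, if_true, Bool.and_false, Bool.false_and,
            Bool.if_false_left, if_false]
          rw [htog]
          simp only [show ('"' == '/') = false by decide, Bool.and_false, if_false,
            Bool.false_eq_true, if_false]
          exact (ih rs hrs).1 _ _ _ _ (Or.inl (by simp [escOf_cons]))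
        · have hqb : (c == '"') = false := by simpa using hq
          by_cases hcom : (!inq && c == '/' && rs.head? == some '/') = true
          · -- comment branch
            have hslash : c = '/' := by
              simp only [Bool.and_eq_true, beq_iff_eq] at hcom; exact hcom.1.2
            have hinq : inq = false := by
              simp only [Bool.and_eq_true, Bool.not_eq_eq_eq_not, Bool.not_true] at hcom
              exact hcom.1.1
            obtain ⟨rs', hrs'⟩ : ∃ rs', rs = '/' :: rs' := by
              rcases rs with _ | ⟨d, rs'⟩
              · simp at hcom
              · simp only [Bool.and_eq_true, beq_iff_eq, List.head?] at hcom
                exact ⟨rs', by rw [Option.some_inj.mp hcom.2]⟩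
            subst hslash hinq hrs'
            have hlen' : rs'.length ≤ n := by simp at hrs; omega
            simp only [stripA, stripBgo, hqb, if_false, hcom, dif_pos, Bool.false_eq_true,
              Bool.and_false, Bool.false_and, if_true, beq_self_eq_true, Bool.and_true,
              Bool.not_false, Bool.true_and]
            have hskip : skipLineA pre ('/' :: '/' :: rs') = skipLineA ('/' :: '/' :: pre) rs' := by
              simp [skipLineA]
            rw [hskip]
            exact ((ih rs' hlen').2 ('/' :: '/' :: pre) false out).symm
          · -- plain character (possibly a lone '/')
            by_cases hp : (!inq && c == '/') = true
            · -- '/' not starting a comment: B goes pending, then flushes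
              have hslash : c = '/' := by
                simp only [Bool.and_eq_true, beq_iff_eq] at hp; exact hp.2
              have hhead : rs.head? ≠ some '/' := by
                intro hh
                exact hcom (by simp [hp, hh])
              subst hslash
              have hinq : inq = false := by
                simp only [Bool.and_eq_true, Bool.not_eq_eq_eq_not, Bool.not_true] at hp
                exact hp.1
              subst hinq
              have hheadb : (rs.head? == some '/') = false := by simpa using hhead
              have hA : stripA pre ('/' :: rs) false out
                  = stripA ('/' :: pre) rs false ('/' :: out) := by
                simp [stripA, hheadb]
              have hB : stripBgo ('/' :: rs) false esc false false out
                  = stripBgo rs false false true false out := by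
                simp [stripBgo]
              rw [hA, hB, stripB_flush rs false false out hhead]
              exact (ih rs hrs).1 ('/' :: pre) false false ('/' :: out)
                (Or.inl (by simp [escOf_cons]))
            · -- ordinary character
              have hpb : (!inq && c == '/') = false := by simpa using hp
              have hescnew : (c == '\\' && !esc) = escOf (c :: pre) := by
                rcases H with h | h | h
                · rw [h, escOf_cons]
                · have : c = '\r' := by simpa using h
                  subst this; simp [escOf_cons]
                · have : c = '\n' := by simpa using h
                  subst this; simp [escOf_cons]
              simp only [stripA, stripBgo, hqb, if_false, hcom, dif_neg, Bool.false_eq_true,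
                Bool.and_false, Bool.false_and, if_true, hpb]
              rw [hescnew]
              exact (ih rs hrs).1 (c :: pre) inq _ (c :: out)
                (Or.inl rfl)
      · intro pre inq out
        by_cases hnl : (c == '\r' || c == '\n') = true
        · have hq : (c == '"') = false := by
            rcases Bool.or_eq_true_iff.mp hnl with h | h <;>
              (rw [beq_iff_eq] at h; subst h; decide)
          have hsl : (c == '/') = false := by
            rcases Bool.or_eq_true_iff.mp hnl with h | h <;>
              (rw [beq_iff_eq] at h; subst h; decide)
          have hbs : (c == '\\') = false := by
            rcases Bool.or_eq_true_iff.mp hnl with h | h <;>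
              (rw [beq_iff_eq] at h; subst h; decide)
          have hskip : skipLineA pre (c :: rs) = (pre, c :: rs) := by
            simp [skipLineA, hnl]
          rw [hskip]
          simp only [stripBgo, hnl, if_true, stripA, hq, if_false, hsl,
            Bool.and_false, Bool.false_and, dif_neg, Bool.false_eq_true]
          exact ((ih rs hrs).1 (c :: pre) inq false (c :: out)
            (Or.inl (by simp [escOf_cons, hbs]))).symm
        · have hnlb : (c == '\r' || c == '\n') = false := by simpa using hnl
          have hskip : skipLineA pre (c :: rs) = skipLineA (c :: pre) rs := by
            simp [skipLineA, hnlb]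
          rw [hskip]
          simp only [stripBgo, hnlb, if_false, Bool.false_eq_true]
          exact (ih rs hrs).2 (c :: pre) inq out

theorem tok_equiv : ∀ n (rest : List Char), rest.length ≤ n →
    (∀ pre acc, tokGoA pre rest acc = tokBgo rest .top acc) ∧
    (∀ (pre0 buf : List Char) acc,
      tokBgo rest (.str buf (escOf buf)) acc =
        tokGoA
          (match (scanStrA (buf ++ '"' :: pre0) rest buf).2.1 with
           | [] => (scanStrA (buf ++ '"' :: pre0) rest buf).1
           | d :: _ => d :: (scanStrA (buf ++ '"' :: pre0) rest buf).1)
          (scanStrA (buf ++ '"' :: pre0) rest buf).2.1.tail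
          (acc ++ [unescapeTok (scanStrA (buf ++ '"' :: pre0) rest buf).2.2])) ∧
    (∀ (pre buf : List Char) acc,
      tokBgo rest (.bare buf) acc =
        tokGoA ((bareScanA buf rest).1.reverse ++ pre) (bareScanA buf rest).2
          (acc ++ [String.ofList (bareScanA buf rest).1])) := by
  intro n
  induction n with
  | zero =>
    intro rest hlen
    have hr : rest = [] := List.length_eq_zero_iff.mp (Nat.le_zero.mp hlen)
    subst hr
    exact ⟨fun pre acc => by simp [tokGoA, tokBgo],
           fun pre0 buf acc => by simp [tokBgo, scanStrA, tokGoA],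
           fun pre buf acc => by simp [tokBgo, bareScanA, tokGoA]⟩
  | succ n ih =>
    intro rest hlen
    cases rest with
    | nil =>
      exact ⟨fun pre acc => by simp [tokGoA, tokBgo],
             fun pre0 buf acc => by simp [tokBgo, scanStrA, tokGoA],
             fun pre buf acc => by simp [tokBgo, bareScanA, tokGoA]⟩
    | cons c rs =>
      have hrs : rs.length ≤ n := by simpa using hlen
      refine ⟨?_, ?_, ?_⟩
      · -- T1: top level
        intro pre acc
        by_cases hsp : PySem.Chars.isspace c = true
        · simp only [tokGoA, tokBgo, hsp, if_true]
          exact (ih rs hrs).1 (c :: pre) acc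
        · have hspb : PySem.Chars.isspace c = false := by simpa using hsp
          by_cases hbr : (c == '{' || c == '}') = true
          · simp only [tokGoA, tokBgo, hspb, if_false, hbr, if_true, Bool.false_eq_true]
            exact (ih rs hrs).1 (c :: pre) _
          · have hbrb : (c == '{' || c == '}') = false := by simpa using hbr
            by_cases hq : (c == '"') = true
            · have hc : c = '"' := by simpa using hq
              subst hc
              simp only [tokGoA, tokBgo, hspb, if_false, hbrb, if_true, beq_self_eq_true,
                Bool.false_eq_true]
              have h2 := (ih rs hrs).2.1 pre [] acc
              simpa [show escOf [] = false from rfl] using h2.symm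
            · have hqb : (c == '"') = false := by simpa using hq
              simp only [tokGoA, tokBgo, hspb, hbrb, hqb, if_false, Bool.false_eq_true]
              exact ((ih rs hrs).2.2 pre [c] acc).symm
      · -- T2: inside a quoted string
        intro pre0 buf acc
        have hbs : bsRunA (buf ++ '"' :: pre0) = bsRunA buf :=
          bsRunA_append_not_bs buf pre0 (by decide)
        have hpar : (bsRunA (buf ++ '"' :: pre0) % 2 == 0) = !escOf buf := by
          rw [hbs]
          rcases Nat.mod_two_eq_zero_or_one (bsRunA buf) with h2 | h2 <;> simp [escOf, h2]
        by_cases hcond : (c == '"' && !escOf buf) = true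
        · have hA : scanStrA (buf ++ '"' :: pre0) (c :: rs) buf
              = (buf ++ '"' :: pre0, c :: rs, buf.reverse) := by
            simp [scanStrA, hpar, hcond]
          rw [hA]
          simp only [tokBgo, hcond, if_true, List.tail_cons]
          exact ((ih rs hrs).1 _ _).symm
        · have hcondb : (c == '"' && !escOf buf) = false := by simpa using hcond
          have hA : scanStrA (buf ++ '"' :: pre0) (c :: rs) buf
              = scanStrA ((c :: buf) ++ '"' :: pre0) rs (c :: buf) := by
            simp only [scanStrA, hpar, hcondb, Bool.false_eq_true, if_false]
            rfl
          rw [hA]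
          simp only [tokBgo, hcondb, Bool.false_eq_true, if_false]
          rw [show (c == '\\' && !escOf buf) = escOf (c :: buf) from (escOf_cons c buf).symm]
          exact (ih rs hrs).2.1 pre0 (c :: buf) acc
      · -- T3: inside a bare token
        intro pre buf acc
        by_cases hstop : (PySem.Chars.isspace c || c == '{' || c == '}' || c == '"') = true
        · have hB : bareScanA buf (c :: rs) = (buf.reverse, c :: rs) := by
            simp only [bareScanA]
            rw [if_pos]
            simpa [Bool.or_assoc] using hstop
          rw [hB]
          simp only [List.reverse_reverse]
          by_cases hsp : PySem.Chars.isspace c = true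
          · have h1 : (c == '{') = false := by
              cases hb : c == '{'
              · rfl
              · exact absurd (by rw [beq_iff_eq.mp hb] at hsp; exact hsp) (by decide)
            have h2 : (c == '}') = false := by
              cases hb : c == '}'
              · rfl
              · exact absurd (by rw [beq_iff_eq.mp hb] at hsp; exact hsp) (by decide)
            have h3 : (c == '"') = false := by
              cases hb : c == '"'
              · rfl
              · exact absurd (by rw [beq_iff_eq.mp hb] at hsp; exact hsp) (by decide)
            simp only [tokGoA, tokBgo, hsp, h1, h2, h3, if_true, Bool.or_self,
              Bool.false_eq_true, if_false, Bool.or_false]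
            exact ((ih rs hrs).1 _ _).symm
          · have hspb : PySem.Chars.isspace c = false := by simpa using hsp
            by_cases hbr : (c == '{' || c == '}') = true
            · simp only [tokGoA, tokBgo, hspb, hbr, if_true, Bool.false_eq_true, if_false,
                Bool.false_or, List.append_assoc, List.singleton_append]
              exact ((ih rs hrs).1 _ _).symm
            · have hbrb : (c == '{' || c == '}') = false := by simpa using hbr
              have hq : (c == '"') = true := by
                rcases Bool.or_eq_true_iff.mp hstop with h | h
                · rcases Bool.or_eq_true_iff.mp h with h' | h'
                  · rcases Bool.or_eq_true_iff.mp h' with h'' | h''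
                    · exact absurd h'' (by simp [hspb])
                    · exact absurd h'' (by simp [hbrb] at hbrb ⊢; simp_all)
                  · exact absurd h' (by intro hh; simp [hh] at hbrb)
                · exact h
              have hc : c = '"' := by simpa using hq
              subst hc
              simp only [tokGoA, tokBgo, hspb, hbrb, if_false, beq_self_eq_true, if_true,
                Bool.false_eq_true]
              have h2 := (ih rs hrs).2.1 (buf ++ pre) [] (acc ++ [String.ofList buf.reverse])
              simpa [show escOf [] = false from rfl] using h2
        · have hstopb : (PySem.Chars.isspace c || c == '{' || c == '}' || c == '"') = false := by
            simpa using hstop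
          have hB : bareScanA buf (c :: rs) = bareScanA (c :: buf) rs := by
            simp only [bareScanA]
            rw [if_neg hstop]
          rw [hB]
          simp only [tokBgo, hstopb, Bool.false_eq_true, if_false]
          exact (ih rs hrs).2.2 pre (c :: buf) acc

-- ===== VERDICT (by name: the statement is the Claim_ definition above) =====
theorem tokenize_vdf_py_spec : Claim_equal_tokenize_vdf_py := by
  intro text _
  unfold Spec_tokenize_vdf_py tokenize_vdf_py tokenize_vdf_py_alt
  rw [(strip_equiv text.toList.length text.toList le_rfl).1 [] false false []
        (Or.inl (by simp [escOf, bsRunA]))]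
  exact ((tok_equiv _ _ le_rfl).1 [] [])
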